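-- pv_equiv track=rewrite | github.com/sooohka/Algo | src/python/1475.py | solution
-- ===== SOURCE A (Python) =====
-- import sys, math
--
-- def solution(n):
--     arr = list(map(lambda k: k, list(n)))
--     dict = {}
--     for i in arr:
--         if i == "9":
--             i = "6"
--         if i not in dict:
--             dict[i] = 1
--         else:
--             dict[i] += 1
--     try:
--         dict["6"] = math.ceil(dict["6"] / 2)
--     except:
--         dict["6"] = 0
--     return dict[max(dict, key=lambda k: dict[k])]
-- ===== SOURCE B (Python) =====
-- def solution(n):
--     items = sorted('6' if ch == '9' else ch for ch in n)
--     return _scan(items, 0)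
--
-- def _scan(items, best):
--     if not items:
--         return best
--     head = items[0]
--     run = 1
--     while run < len(items) and items[run] == head:
--         run += 1
--     c = (run + 1) // 2 if head == '6' else run
--     return _scan(items[run:], max(best, c))
-- ===== Notes on version B (the rewrite author's own statement) =====
-- stated objective: alternative
-- what changed: Replaces A's one-pass dict accumulation plus max-by-key lookup with a sort-then-scan: sort the merged characters and recursively walk the sorted list run by run, taking a running max of the (ceil-halved for '6') run lengths; no dictionary or counting pass at all.
import Mathlib
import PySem

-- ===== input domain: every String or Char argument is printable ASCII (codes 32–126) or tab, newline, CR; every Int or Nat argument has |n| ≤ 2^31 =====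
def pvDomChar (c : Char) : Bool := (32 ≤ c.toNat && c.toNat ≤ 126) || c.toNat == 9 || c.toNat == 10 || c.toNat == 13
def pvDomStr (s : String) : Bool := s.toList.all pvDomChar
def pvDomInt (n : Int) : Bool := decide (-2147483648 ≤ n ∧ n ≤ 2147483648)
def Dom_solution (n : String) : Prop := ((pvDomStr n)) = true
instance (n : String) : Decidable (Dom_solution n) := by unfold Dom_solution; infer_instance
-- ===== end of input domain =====

-- B replaces A's one-pass dict accumulation + max-by-key lookup with sort-then-scan:
-- sort the merged characters and walk the sorted list run by run, keeping a running max
-- of the adjusted run lengths (objective: alternative).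

-- ===== PORT A =====
-- math.ceil(v / 2) on an int v (exact: -((-v) // 2) is ceiling division by 2)
def pvCeilHalf (v : Int) : Int := -(PySem.Int.floordiv (-v) 2)

def solution (n : String) : Int :=
  let arr := n.toList.map (fun k => k)
  let d := arr.foldl (fun (d : PySem.Dict Char Int) i =>
    let i := if i = '9' then '6' else i
    if !d.contains i then d.insert i 1 else d.insert i (d.getD i 0 + 1))
    PySem.Dict.empty
  -- try: dict["6"] = math.ceil(dict["6"] / 2)  except: dict["6"] = 0  (KeyError ↔ get? = none)
  let d :=
    match d.get? '6' with
    | some v => d.insert '6' (pvCeilHalf v)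
    | none => d.insert '6' 0
  -- dict[max(dict, key=lambda k: dict[k])]; the dict always contains '6', so max never raises
  match PySem.List.max? d.keys (fun k => d.getD k 0) with
  | some m => d.getD m 0
  | none => 0  -- unreachable

-- ===== PORT B =====
-- the inner while loop of _scan: run = 1; while run < len(items) and items[run] == head: run += 1
-- counted as 1 + (number of leading copies of head in the tail)
def pvCountLeading (h : Char) : List Char → Nat
  | [] => 0
  | c :: t => if c = h then pvCountLeading h t + 1 else 0

-- _scan(items, best): recursion on the sorted list, dropping one run per step
def pvScan : List Char → Int → Int
  | [], best => best
  | h :: t, best =>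
    let run : Nat := 1 + pvCountLeading h t
    let c : Int := if h = '6' then PySem.Int.floordiv ((run : Int) + 1) 2 else (run : Int)
    pvScan ((h :: t).drop run) (max best c)
termination_by items _ => items.length
decreasing_by
  simp only [List.length_drop, List.length_cons]
  omega

def solution_alt (n : String) : Int :=
  let items := PySem.List.sorted (n.toList.map (fun ch => if ch = '9' then '6' else ch))
    (fun x => x) false
  pvScan items 0

-- ===== PRECONDITION & SPEC =====
def Spec_solution (n : String) (out : Int) : Prop := out = solution_alt n
instance (n : String) (out : Int) : Decidable (Spec_solution n out) := by unfold Spec_solution; infer_instance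

-- ===== CLAIM (what is proved, stated in full; the proofs are below) =====
def Claim_equal_solution : Prop := ∀ (n : String), Dom_solution n → Spec_solution n (solution n)

-- ===== LEMMAS AND PROOFS =====

-- the adjusted count of a character among the merged characters
def pvVal (items : List Char) (k : Char) : Int :=
  if k = '6' then pvCeilHalf (List.count '6' items) else (List.count k items : Int)

theorem pvCeilHalf_nonneg {v : Int} (h : 0 ≤ v) : 0 ≤ pvCeilHalf v := by
  unfold pvCeilHalf
  rw [show PySem.Int.floordiv (-v) 2 = Int.fdiv (-v) 2 from rfl]
  rw [Int.fdiv_eq_ediv_of_nonneg _ (by omega)]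
  omega

theorem pv_step_eq :
    (fun (d : PySem.Dict Char Int) (i : Char) =>
      if !d.contains i then d.insert i 1 else d.insert i (d.getD i 0 + 1))
    = (fun (d : PySem.Dict Char Int) (i : Char) => d.insert i (d.getD i 0 + 1)) := by
  funext d i
  by_cases h : d.contains i = true
  · simp [h]
  · have h' : d.contains i = false := by simpa using h
    rw [if_pos (by simp [h']), PySem.Dict.getD_of_not_contains d 0 h']
    norm_num

theorem pv_getD_d2 (items : List Char) (k : Char) :
    (match (PySem.Dict.counter items).get? '6' with
     | some v => (PySem.Dict.counter items).insert '6' (pvCeilHalf v)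
     | none => (PySem.Dict.counter items).insert '6' 0).getD k 0 = pvVal items k := by
  cases hg : (PySem.Dict.counter items).get? '6' with
  | some v =>
    have hv : v = (List.count '6' items : Int) := by
      have := PySem.Dict.getD_of_get?_eq_some (PySem.Dict.counter items) (0 : Int) hg
      rw [PySem.Dict.getD_counter] at this; omega
    simp only [PySem.Dict.getD_insert, pvVal]
    by_cases hk : k = '6'
    · simp [hk, hv]
    · simp [hk, PySem.Dict.getD_counter]
  | none =>
    have hc : (PySem.Dict.counter items).contains '6' = false :=
      (PySem.Dict.get?_eq_none_iff_contains _ _).mp hg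
    have h0 : List.count '6' items = 0 := by
      rw [PySem.Dict.contains_counter] at hc
      exact List.count_eq_zero.mpr (by simpa using hc)
    simp only [PySem.Dict.getD_insert, pvVal]
    by_cases hk : k = '6'
    · simp [hk, h0]; decide
    · simp [hk, PySem.Dict.getD_counter]

theorem pv_keys_d2 (items : List Char) :
    (match (PySem.Dict.counter items).get? '6' with
     | some v => (PySem.Dict.counter items).insert '6' (pvCeilHalf v)
     | none => (PySem.Dict.counter items).insert '6' 0).keys
    = PySem.Set.add (PySem.Set.ofList items) '6' := by
  cases hg : (PySem.Dict.counter items).get? '6' with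
  | some v =>
    have hc : (PySem.Dict.counter items).contains '6' = true := by
      rcases hcc : (PySem.Dict.counter items).contains '6' with _ | _
      · rw [(PySem.Dict.get?_eq_none_iff_contains _ _).mpr hcc] at hg; cases hg
      · rfl
    have hmem : '6' ∈ PySem.Set.ofList items := by
      rw [← PySem.Dict.keys_counter items]
      exact (PySem.Dict.contains_iff_mem_keys _ _).mp hc
    simp [PySem.Dict.keys_insert_of_contains _ _ hc, PySem.Dict.keys_counter,
      PySem.Set.add_of_mem hmem]
  | none =>
    have hc : (PySem.Dict.counter items).contains '6' = false :=
      (PySem.Dict.get?_eq_none_iff_contains _ _).mp hg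
    have hnmem : '6' ∉ PySem.Set.ofList items := by
      rw [← PySem.Dict.keys_counter items]
      intro hm
      rw [(PySem.Dict.contains_iff_mem_keys _ _).mpr hm] at hc; cases hc
    simp [PySem.Dict.keys_insert_of_not_contains _ _ hc, PySem.Dict.keys_counter,
      PySem.Set.add_of_not_mem hnmem]

-- the leading copies of h in a sorted tail are ALL the copies, and everything after them is > h
theorem pv_leading_split (h : Char) (t : List Char)
    (hle : ∀ x ∈ t, h ≤ x) (hs : t.Pairwise (· ≤ ·)) :
    List.count h t = pvCountLeading h t ∧
    List.take (pvCountLeading h t) t = List.replicate (pvCountLeading h t) h ∧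
    ∀ x ∈ t.drop (pvCountLeading h t), h < x := by
  induction t with
  | nil => simp [pvCountLeading]
  | cons c t' ih =>
    rcases List.pairwise_cons.mp hs with ⟨hct', ht'⟩
    by_cases hc : c = h
    · have hcl : pvCountLeading h (c :: t') = pvCountLeading h t' + 1 := by
        simp [pvCountLeading, hc]
      obtain ⟨i1, i2, i3⟩ := ih (fun x hx => hle x (by simp [hx])) ht'
      rw [hcl]
      refine ⟨?_, ?_, ?_⟩
      · rw [hc, List.count_cons_self, i1]
      · rw [List.take_succ_cons, List.replicate_succ, i2, hc]
      · rw [List.drop_succ_cons]; exact i3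
    · have hhc : h < c := lt_of_le_of_ne (hle c (by simp)) (fun e => hc e.symm)
      have hcl : pvCountLeading h (c :: t') = 0 := by
        simp [pvCountLeading, hc]
      rw [hcl]
      refine ⟨?_, by simp, ?_⟩
      · rw [List.count_cons_of_ne hc]
        exact List.count_eq_zero.mpr (fun hm => absurd (hct' h hm) (by simp [hhc.not_ge]))
      · intro x hx
        rcases List.mem_cons.mp hx with rfl | hx'
        · exact hhc
        · exact lt_of_lt_of_le hhc (hct' x hx')

-- the scan over a sorted list yields a value ≥ best that bounds every adjusted count
-- and is either best or one of the adjusted counts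
theorem pv_scan_spec : ∀ (s : List Char) (best : Int), s.Pairwise (· ≤ ·) →
    best ≤ pvScan s best ∧ (∀ d ∈ s, pvVal s d ≤ pvScan s best) ∧
    (pvScan s best = best ∨ ∃ d ∈ s, pvVal s d = pvScan s best) := by
  intro s best
  induction s, best using pvScan.induct with
  | case1 best => intro _; simp [pvScan]
  | case2 h t best run c ih =>
    intro hs
    rcases List.pairwise_cons.mp hs with ⟨hht, ht⟩
    obtain ⟨hcount, htake, hdrop⟩ := pv_leading_split h t hht ht
    have hc_def : c = if h = '6'
        then PySem.Int.floordiv (((1 + pvCountLeading h t : Nat) : Int) + 1) 2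
        else ((1 + pvCountLeading h t : Nat) : Int) := rfl
    set k := pvCountLeading h t with hk
    set rest := t.drop k with hrest
    have hrest_eq : (h :: t).drop run = rest := by
      show (h :: t).drop (1 + pvCountLeading h t) = t.drop k
      rw [Nat.add_comm, List.drop_succ_cons]
    have hrest_sorted : rest.Pairwise (· ≤ ·) := ht.sublist (List.drop_sublist k t)
    have hsplit : t = List.replicate k h ++ rest := by
      rw [← htake, List.take_append_drop]
    have hcount_h : List.count h (h :: t) = k + 1 := by
      rw [List.count_cons_self, hcount]
    have hnot_h : ∀ d ∈ rest, h < d := hdrop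
    have hcount_rest : ∀ d, d ≠ h → List.count d (h :: t) = List.count d rest := by
      intro d hd
      rw [List.count_cons_of_ne (Ne.symm hd), hsplit, List.count_append,
        List.count_replicate]
      simp [Ne.symm hd]
    have hval_rest : ∀ d ∈ rest, pvVal (h :: t) d = pvVal rest d := by
      intro d hd
      have hdh : d ≠ h := (hnot_h d hd).ne'
      unfold pvVal
      by_cases h6 : d = '6'
      · subst h6
        rw [if_pos rfl, if_pos rfl, hcount_rest '6' hdh]
      · rw [if_neg h6, if_neg h6, hcount_rest d hdh]
    have hval_h : pvVal (h :: t) h = c := by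
      unfold pvVal
      by_cases h6 : h = '6'
      · subst h6
        rw [if_pos rfl, hcount_h, hc_def, if_pos rfl]
        unfold pvCeilHalf
        rw [PySem.Int.floordiv_eq_ediv_of_pos (by norm_num),
          PySem.Int.floordiv_eq_ediv_of_pos (by norm_num)]
        push_cast
        omega
      · rw [if_neg h6, hcount_h, hc_def, if_neg h6]
        push_cast; ring
    have hmem : ∀ d ∈ (h :: t), d = h ∨ d ∈ rest := by
      intro d hd
      rcases List.mem_cons.mp hd with rfl | hd'
      · exact Or.inl rfl
      · rw [hsplit] at hd'
        rcases List.mem_append.mp hd' with hd'' | hd''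
        · exact Or.inl (List.eq_of_mem_replicate hd'')
        · exact Or.inr hd''
    have hstep : pvScan (h :: t) best = pvScan rest (max best c) := by
      conv_lhs => rw [pvScan]
      rw [hrest_eq, ← hc_def]
    rw [hrest_eq] at ih
    obtain ⟨ih0, ih1, ih2⟩ := ih hrest_sorted
    rw [hstep]
    refine ⟨le_trans (le_max_left _ _) ih0, ?_, ?_⟩
    · intro d hd
      rcases hmem d hd with rfl | hd'
      · calc pvVal (d :: t) d = c := hval_h
          _ ≤ max best c := le_max_right _ _
          _ ≤ _ := ih0
      · rw [hval_rest d hd']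
        exact ih1 d hd'
    · rcases ih2 with heq | ⟨d, hd, hdv⟩
      · by_cases hbc : best ≤ c
        · right
          exact ⟨h, by simp, by rw [hval_h, heq, max_eq_right hbc]⟩
        · left
          rw [heq, max_eq_left (le_of_not_ge hbc)]
      · right
        refine ⟨d, by rw [hsplit]; simp [List.mem_append, hd], ?_⟩
        rw [hval_rest d hd, hdv]

-- ===== VERDICT (by name: the statement is the Claim_ definition above) =====
theorem solution_spec : Claim_equal_solution := by
  intro n _
  unfold Spec_solution solution solution_alt
  simp only [List.map_id_fun', id]
  set items := n.toList.map (fun ch => if ch = '9' then '6' else ch) with hitems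
  -- A's counting loop is Counter(items)
  have hfold : n.toList.foldl (fun (d : PySem.Dict Char Int) i =>
      let i := if i = '9' then '6' else i
      if !d.contains i then d.insert i 1 else d.insert i (d.getD i 0 + 1))
      PySem.Dict.empty = PySem.Dict.counter items := by
    rw [← PySem.Dict.foldl_insert_getD_add_one_eq_counter, hitems, List.foldl_map]
    congr 1
    funext d i
    exact congrFun (congrFun pv_step_eq d) (if i = '9' then '6' else i)
  simp only [hfold]
  set d2 := (match (PySem.Dict.counter items).get? '6' with
     | some v => (PySem.Dict.counter items).insert '6' (pvCeilHalf v)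
     | none => (PySem.Dict.counter items).insert '6' 0) with hd2
  have hkeys : d2.keys = PySem.Set.add (PySem.Set.ofList items) '6' := pv_keys_d2 items
  have hval : ∀ k, d2.getD k 0 = pvVal items k := fun k => pv_getD_d2 items k
  have h6 : '6' ∈ d2.keys := by
    rw [hkeys]; exact (PySem.Set.mem_add _ _ _).mpr (Or.inr rfl)
  -- B's sorted list: a permutation of items, so counts and membership agree
  set s := PySem.List.sorted items (fun x => x) false with hsdef
  have hperm : s.Perm items := PySem.List.sorted_perm items (fun x => x) false
  have hsorted : s.Pairwise (· ≤ ·) := PySem.List.sorted_pairwise items (fun x => x)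
  have hvs : ∀ d, pvVal s d = pvVal items d := by
    intro d
    unfold pvVal
    rw [hperm.count_eq, hperm.count_eq]
  obtain ⟨hq0, hq1, hq2⟩ := pv_scan_spec s 0 hsorted
  cases hmax : PySem.List.max? d2.keys (fun k => d2.getD k 0) with
  | none =>
    rw [PySem.List.max?_eq_none_iff] at hmax
    rw [hmax] at h6; cases h6
  | some m =>
    have hmmem : m ∈ d2.keys := PySem.List.max?_mem hmax
    have hmax' : ∀ y ∈ d2.keys, d2.getD y 0 ≤ d2.getD m 0 := fun y hy =>
      PySem.List.max?_isMax hmax y hy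
    show d2.getD m 0 = pvScan s 0
    -- A's result r = d2.getD m 0; B's result q = pvScan s 0; show r = q
    have h0le : (0 : Int) ≤ d2.getD m 0 := by
      have h1 : d2.getD '6' 0 ≤ d2.getD m 0 := hmax' '6' h6
      have h2 : (0:Int) ≤ d2.getD '6' 0 := by
        rw [hval]; unfold pvVal; rw [if_pos rfl]
        exact pvCeilHalf_nonneg (by positivity)
      omega
    apply le_antisymm
    · -- r ≤ q
      rw [hval m]
      rcases (by rw [hkeys] at hmmem; exact (PySem.Set.mem_add _ _ _).mp hmmem) with hm | hm
      · have hmi : m ∈ items := (PySem.Set.mem_ofList items m).mp hm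
        have : pvVal s m ≤ pvScan s 0 := hq1 m (hperm.mem_iff.mpr hmi)
        rw [hvs m] at this; exact this
      · subst hm
        by_cases hc : List.count '6' items = 0
        · -- pvVal items '6' = 0 ≤ q
          have : pvVal items '6' = 0 := by
            unfold pvVal; rw [if_pos rfl, hc]; decide
          rw [this]; exact hq0
        · have hmi : '6' ∈ items := by
            rcases List.count_pos_iff.mp (Nat.pos_of_ne_zero hc) with h; exact h
          have : pvVal s '6' ≤ pvScan s 0 := hq1 '6' (hperm.mem_iff.mpr hmi)
          rw [hvs '6'] at this; exact this
    · -- q ≤ r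
      rcases hq2 with heq | ⟨d, hd, hdv⟩
      · rw [heq]; exact h0le
      · rw [← hdv, hvs d, ← hval d]
        apply hmax' d
        rw [hkeys]
        exact (PySem.Set.mem_add _ _ _).mpr
          (Or.inl ((PySem.Set.mem_ofList items d).mpr (hperm.mem_iff.mp hd)))
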